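-- pv_equiv track=rewrite | github.com/proTao/leetcode | 888.py | fairCandySwap
-- ===== SOURCE A (Python) =====
-- def fairCandySwap(A, B):
--     """
--     :type A: List[int]
--     :type B: List[int]
--     :rtype: List[int]
--     """
--     sumA = sum(A)
--     sumB = sum(B)
--     swap = False
--     # make A > B
--     if sumB > sumA:
--         A, B = B, A
--         sumA, sumB = sumB, sumA
--         swap = True
--     A.sort(reverse=True)
--     B.sort()
--     delta = (sumA - sumB)//2
--     i = 0
--     j = len(B) - 1
--
--     while True:
--         change_delta = A[i] - B[j]
--         if change_delta == delta:
--             if not swap: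
--                 return A[i], B[j]
--             else:
--                 return B[j], A[i]
--         elif change_delta > delta:
--             i += 1
--         else:
--             j -= 1
--
-- A = [1,2,5]
--
-- B = [2,4,6]
-- ===== SOURCE B (Python) =====
-- def fairCandySwap(A, B):
--     sumA, sumB = sum(A), sum(B)
--     if sumA >= sumB:
--         big, small, flip = A, B, False
--     else:
--         big, small, flip = B, A, True
--     delta = abs(sumA - sumB) // 2
--     smallset = set(small)
--     a = max(x for x in big if x - delta in smallset)
--     return (a - delta, a) if flip else (a, a - delta)
-- ===== Notes on version B (the rewrite author's own statement) =====
-- stated objective: alternative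
-- what changed: Replaced A's sort-both-lists + two-pointer walk by a single hash-set pass: hash the smaller-sum list into a set, then one scan of the larger-sum list keeping the maximum element a with a - delta in the set (A provably returns exactly that pair).
import Mathlib
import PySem

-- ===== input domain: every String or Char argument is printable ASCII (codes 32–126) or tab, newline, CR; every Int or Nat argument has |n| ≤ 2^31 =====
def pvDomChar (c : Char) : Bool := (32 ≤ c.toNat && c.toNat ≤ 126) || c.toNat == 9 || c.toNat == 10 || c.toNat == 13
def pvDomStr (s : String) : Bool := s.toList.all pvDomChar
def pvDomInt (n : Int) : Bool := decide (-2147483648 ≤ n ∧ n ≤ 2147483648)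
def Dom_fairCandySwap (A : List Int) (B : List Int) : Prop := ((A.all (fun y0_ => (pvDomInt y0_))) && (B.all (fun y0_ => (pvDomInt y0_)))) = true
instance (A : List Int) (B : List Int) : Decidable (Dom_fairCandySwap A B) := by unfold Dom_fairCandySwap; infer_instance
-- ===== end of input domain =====

-- B replaces A's sort-both-lists + two-pointer walk by a single hash-set pass over the larger-sum list.
-- Note: Python A sorts its argument lists in place; the equivalence proved here is about the RETURN value only.

-- ===== PORT A =====
-- A's `while True` two-pointer loop: each step returns, does i += 1, or does j -= 1; indices are
-- read with Python semantics (pyGet?: negative j wraps, out of range = IndexError = none).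
-- The loop always either returns or hits an IndexError within |A| + 2|B| + 2 steps (i only grows,
-- j only shrinks), so that fuel is not a behavioural restriction; none = A raises.
def fcsLoop (As Bs : List Int) (delta : Int) (i j : Int) (fuel : Nat) : Option (Int × Int) :=
  match fuel with
  | 0 => none
  | fuel + 1 =>
    match PySem.List.pyGet? As i, PySem.List.pyGet? Bs j with
    | some a, some b =>
        if a - b = delta then some (a, b)
        else if a - b > delta then fcsLoop As Bs delta (i + 1) j fuel
        else fcsLoop As Bs delta i (j - 1) fuel
    | _, _ => none

def fairCandySwap (A : List Int) (B : List Int) : Int × Int :=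
  let sumA := A.sum
  let sumB := B.sum
  -- `if sumB > sumA: A, B = B, A; sumA, sumB = sumB, sumA; swap = True`
  let (A1, B1, sA, sB, swap) :=
    if sumB > sumA then (B, A, sumB, sumA, true) else (A, B, sumA, sumB, false)
  let As := PySem.List.sorted A1 (fun x => x) true    -- A.sort(reverse=True)
  let Bs := PySem.List.sorted B1 (fun x => x) false   -- B.sort()
  let delta := PySem.Int.floordiv (sA - sB) 2
  match fcsLoop As Bs delta 0 ((Bs.length : Int) - 1) (As.length + 2 * Bs.length + 2) with
  | some (a, b) => if swap then (b, a) else (a, b)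
  | none => (0, 0)   -- IndexError in Python; excluded by Pre_

-- ===== PORT B =====
def fairCandySwap_alt (A : List Int) (B : List Int) : Int × Int :=
  let sumA := A.sum
  let sumB := B.sum
  let (big, small, flip) :=
    if sumA ≥ sumB then (A, B, false) else (B, A, true)
  let delta := PySem.Int.floordiv |sumA - sumB| 2
  let smallset := PySem.Set.ofList small
  match PySem.List.max? (big.filter (fun x => PySem.Set.contains smallset (x - delta))) (fun y => y) with
  | some a => if flip then (a - delta, a) else (a, a - delta)
  | none => (0, 0)   -- ValueError (max of empty) in Python; excluded by Pre_

-- ===== PRECONDITION & SPEC =====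
-- Pre_: a swap pair exists (some a in the larger-sum list with a - delta in the other list).
-- Exactly on these inputs Python A returns; otherwise its pointers run off and it raises IndexError
-- (and B's `max` of an empty generator raises ValueError).
def Pre_fairCandySwap (A : List Int) (B : List Int) : Prop :=
  let big := if A.sum ≥ B.sum then A else B
  let small := if A.sum ≥ B.sum then B else A
  let delta := PySem.Int.floordiv (if A.sum ≥ B.sum then A.sum - B.sum else B.sum - A.sum) 2
  ∃ a ∈ big, a - delta ∈ small
instance (A : List Int) (B : List Int) : Decidable (Pre_fairCandySwap A B) := by
  unfold Pre_fairCandySwap; infer_instance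

def pvWitness_fairCandySwap : List Int × List Int := ([1, 2, 5], [2, 4])

def Spec_fairCandySwap (A : List Int) (B : List Int) (out : Int × Int) : Prop := out = fairCandySwap_alt A B
instance (A : List Int) (B : List Int) (out : Int × Int) : Decidable (Spec_fairCandySwap A B out) := by unfold Spec_fairCandySwap; infer_instance

-- ===== CLAIM (what is proved, stated in full; the proofs are below) =====
def Claim_equal_fairCandySwap : Prop := ∀ (A : List Int) (B : List Int), Dom_fairCandySwap A B → Pre_fairCandySwap A B → Spec_fairCandySwap A B (fairCandySwap A B)

-- ===== LEMMAS AND PROOFS =====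

-- Invariant proof for A's two-pointer loop: on a descending As and ascending Bs, with everything
-- left of i partnerless and everything right of j too large, if a still-reachable candidate exists
-- the loop returns (m, m - delta) with m the largest element of As having a partner in Bs.
theorem fcsLoop_spec (As Bs : List Int) (delta : Int)
    (hA : As.Pairwise (fun a b => b ≤ a)) (hB : Bs.Pairwise (fun a b => a ≤ b)) :
    ∀ (fuel i j : Nat), j < Bs.length →
    As.length - i + (j + 1) ≤ fuel →
    (∀ p, (hp : p < As.length) → p < i → As[p] - delta ∉ Bs) →
    (∀ q, (hq : q < Bs.length) → j < q → ∀ p, (hp : p < As.length) → i ≤ p → As[p] - delta < Bs[q]) →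
    (∃ p, ∃ hp : p < As.length, i ≤ p ∧ As[p] - delta ∈ Bs) →
    ∃ m, fcsLoop As Bs delta (i : Int) (j : Int) fuel = some (m, m - delta) ∧
      m ∈ As ∧ (m - delta) ∈ Bs ∧ ∀ x ∈ As, x - delta ∈ Bs → x ≤ m := by
  have hdesc : ∀ p q (hp : p < As.length) (hq : q < As.length), p ≤ q → As[q] ≤ As[p] := by
    intro p q hp hq hpq
    rcases Nat.eq_or_lt_of_le hpq with h | h
    · subst h; exact le_refl _
    · exact List.pairwise_iff_getElem.mp hA p q hp hq h
  have hasc : ∀ p q (hp : p < Bs.length) (hq : q < Bs.length), p ≤ q → Bs[p] ≤ Bs[q] := by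
    intro p q hp hq hpq
    rcases Nat.eq_or_lt_of_le hpq with h | h
    · subst h; exact le_refl _
    · exact List.pairwise_iff_getElem.mp hB p q hp hq h
  intro fuel
  induction fuel with
  | zero => intro i j hj hfuel _ _ _; omega
  | succ fuel ih =>
    intro i j hj hfuel I1 J hex
    obtain ⟨p0, hp0, hip0, hmem0⟩ := hex
    have hi : i < As.length := lt_of_le_of_lt hip0 hp0
    have hgetA : PySem.List.pyGet? As (i : Int) = some As[i] := by
      rw [PySem.List.pyGet?_natCast]; exact List.getElem?_eq_getElem hi
    have hgetB : PySem.List.pyGet? Bs (j : Int) = some Bs[j] := by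
      rw [PySem.List.pyGet?_natCast]; exact List.getElem?_eq_getElem hj
    by_cases h1 : As[i] - Bs[j] = delta
    · have hstep : fcsLoop As Bs delta (i : Int) (j : Int) (fuel + 1) = some (As[i], Bs[j]) := by
        rw [fcsLoop, hgetA, hgetB]; simp [h1]
      have hbj : Bs[j] = As[i] - delta := by omega
      refine ⟨As[i], by rw [hstep, hbj], List.getElem_mem hi, hbj ▸ List.getElem_mem hj, ?_⟩
      intro x hx hxd
      obtain ⟨p, hp, hxp⟩ := List.mem_iff_getElem.mp hx
      subst hxp
      rcases Nat.lt_or_ge p i with h | h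
      · exact absurd hxd (I1 p hp h)
      · exact hdesc i p hi hp h
    · by_cases h2 : As[i] - Bs[j] > delta
      · have hnot : As[i] - delta ∉ Bs := by
          intro hmem
          obtain ⟨q, hq, hbq⟩ := List.mem_iff_getElem.mp hmem
          rcases Nat.lt_or_ge j q with h | h
          · have := J q hq h i hi le_rfl; omega
          · have := hasc q j hq hj h; omega
        have hex' : ∃ p, ∃ hp : p < As.length, i + 1 ≤ p ∧ As[p] - delta ∈ Bs := by
          rcases Nat.eq_or_lt_of_le hip0 with h | h
          · subst h; exact absurd hmem0 hnot
          · exact ⟨p0, hp0, h, hmem0⟩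
        have I1' : ∀ p, (hp : p < As.length) → p < i + 1 → As[p] - delta ∉ Bs := by
          intro p hp hpi
          rcases Nat.lt_or_ge p i with h | h
          · exact I1 p hp h
          · have : p = i := by omega
            subst this; exact hnot
        have J' : ∀ q, (hq : q < Bs.length) → j < q → ∀ p, (hp : p < As.length) → i + 1 ≤ p → As[p] - delta < Bs[q] := by
          intro q hq hjq p hp hip; exact J q hq hjq p hp (by omega)
        obtain ⟨m, hm, hmA, hmB, hmax⟩ := ih (i + 1) j hj (by omega) I1' J' hex'
        have hstep : fcsLoop As Bs delta (i : Int) (j : Int) (fuel + 1)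
            = fcsLoop As Bs delta ((i : Int) + 1) (j : Int) fuel := by
          rw [fcsLoop, hgetA, hgetB]; simp [h1, h2]
        have hcast : ((i : Int)) + 1 = ((i + 1 : Nat) : Int) := by push_cast; ring
        exact ⟨m, by rw [hstep, hcast]; exact hm, hmA, hmB, hmax⟩
      · have h3 : As[i] - Bs[j] < delta := by omega
        obtain ⟨q0, hq0, hbq0⟩ := List.mem_iff_getElem.mp hmem0
        have hq0j : q0 < j := by
          rcases Nat.lt_or_ge q0 j with h | h
          · exact h
          · exfalso
            rcases Nat.eq_or_lt_of_le h with h' | h'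
            · have hle := hdesc i p0 hi hp0 hip0
              subst h'; omega
            · have := J q0 hq0 h' p0 hp0 hip0; omega
        have J' : ∀ q, (hq : q < Bs.length) → j - 1 < q → ∀ p, (hp : p < As.length) → i ≤ p → As[p] - delta < Bs[q] := by
          intro q hq hjq p hp hip
          rcases Nat.lt_or_ge j q with h | h
          · exact J q hq h p hp hip
          · have hqj : q = j := by omega
            subst hqj
            have hle := hdesc i p hi hp hip
            omega
        obtain ⟨m, hm, hmA, hmB, hmax⟩ := ih i (j - 1) (by omega) (by omega) I1 J' ⟨p0, hp0, hip0, hmem0⟩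
        have hstep : fcsLoop As Bs delta (i : Int) (j : Int) (fuel + 1)
            = fcsLoop As Bs delta (i : Int) ((j : Int) - 1) fuel := by
          rw [fcsLoop, hgetA, hgetB]; simp [h1, h2]
        have hcast : ((j : Int)) - 1 = ((j - 1 : Nat) : Int) := by omega
        exact ⟨m, by rw [hstep, hcast]; exact hm, hmA, hmB, hmax⟩

-- Bridge: on the larger-sum list `big`, A's sorted two-pointer loop and B's filter-and-max
-- return the same witness m (the largest element of big whose partner is in small).
theorem fcs_core (big small : List Int)
    (hex : ∃ a ∈ big, a - PySem.Int.floordiv (big.sum - small.sum) 2 ∈ small) :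
    ∃ m,
      (fcsLoop (PySem.List.sorted big (fun x => x) true) (PySem.List.sorted small (fun x => x) false)
        (PySem.Int.floordiv (big.sum - small.sum) 2) 0
        (((PySem.List.sorted small (fun x => x) false).length : Int) - 1)
        ((PySem.List.sorted big (fun x => x) true).length
          + 2 * (PySem.List.sorted small (fun x => x) false).length + 2)
        = some (m, m - PySem.Int.floordiv (big.sum - small.sum) 2)) ∧
      PySem.List.max? (big.filter (fun x =>
          PySem.Set.contains (PySem.Set.ofList small) (x - PySem.Int.floordiv (big.sum - small.sum) 2)))
        (fun y => y) = some m := by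
  set δ := PySem.Int.floordiv (big.sum - small.sum) 2 with hδ
  set As := PySem.List.sorted big (fun x => x) true with hAs
  set Bs := PySem.List.sorted small (fun x => x) false with hBs
  have hA : As.Pairwise (fun a b => b ≤ a) := PySem.List.sorted_pairwise_rev big (fun x => x)
  have hB : Bs.Pairwise (fun a b => a ≤ b) := PySem.List.sorted_pairwise small (fun x => x)
  obtain ⟨a0, ha0, hpart⟩ := hex
  have ha0' : a0 ∈ As := (PySem.List.mem_sorted _ _ _ _).mpr ha0
  have hpart' : a0 - δ ∈ Bs := (PySem.List.mem_sorted _ _ _ _).mpr hpart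
  obtain ⟨p0, hp0, hap0⟩ := List.mem_iff_getElem.mp ha0'
  have hBlen : 0 < Bs.length := List.length_pos_of_mem hpart'
  have hcast : ((Bs.length : Int) - 1) = ((Bs.length - 1 : Nat) : Int) := by omega
  obtain ⟨m, hm, hmA, hmB, hmax⟩ := fcsLoop_spec As Bs δ hA hB
    (As.length + 2 * Bs.length + 2) 0 (Bs.length - 1)
    (by omega) (by omega)
    (by intro p hp h; omega)
    (by intro q hq h; omega)
    ⟨p0, hp0, Nat.zero_le _, by rw [hap0]; exact hpart'⟩
  refine ⟨m, by rw [hcast]; exact_mod_cast hm, ?_⟩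
  have hpred : ∀ x : Int, (PySem.Set.contains (PySem.Set.ofList small) (x - δ) = true) ↔ x - δ ∈ small := by
    intro x
    rw [PySem.Set.contains_iff, PySem.Set.mem_ofList]
  have hmcand : m ∈ big.filter (fun x => PySem.Set.contains (PySem.Set.ofList small) (x - δ)) := by
    rw [List.mem_filter]
    exact ⟨(PySem.List.mem_sorted _ _ _ _).mp hmA, (hpred m).mpr ((PySem.List.mem_sorted _ _ _ _).mp hmB)⟩
  rcases hmq : PySem.List.max? (big.filter (fun x =>
      PySem.Set.contains (PySem.Set.ofList small) (x - δ))) (fun y => y) with _ | m'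
  · rw [PySem.List.max?_eq_none_iff] at hmq
    rw [hmq] at hmcand
    exact absurd hmcand (List.not_mem_nil)
  · have hm'mem := PySem.List.max?_mem hmq
    rw [List.mem_filter] at hm'mem
    have h1 : m' ≤ m := hmax m' ((PySem.List.mem_sorted _ _ _ _).mpr hm'mem.1)
      ((PySem.List.mem_sorted _ _ _ _).mpr ((hpred m').mp hm'mem.2))
    have h2 : m ≤ m' := PySem.List.max?_isMax hmq m hmcand
    have : m' = m := le_antisymm h1 h2
    rw [this]

-- ===== VERDICT (by name: the statement is the Claim_ definition above) =====
theorem fairCandySwap_spec : Claim_equal_fairCandySwap := by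
  intro A B _ hpre
  unfold Spec_fairCandySwap
  unfold Pre_fairCandySwap at hpre
  by_cases hc : A.sum ≥ B.sum
  · simp only [if_pos hc] at hpre
    have hc' : ¬ (B.sum > A.sum) := by omega
    obtain ⟨m, hloop, hmax⟩ := fcs_core A B hpre
    simp only [fairCandySwap, fairCandySwap_alt, if_neg hc', if_pos hc]
    rw [abs_of_nonneg (by omega : (0:Int) ≤ A.sum - B.sum)]
    rw [hloop, hmax]
  · simp only [if_neg hc] at hpre
    have hc' : B.sum > A.sum := by omega
    obtain ⟨m, hloop, hmax⟩ := fcs_core B A hpre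
    simp only [fairCandySwap, fairCandySwap_alt, if_pos hc', if_neg hc]
    rw [abs_of_neg (by omega : A.sum - B.sum < 0)]
    rw [show -(A.sum - B.sum) = B.sum - A.sum by ring]
    rw [hloop, hmax]
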